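-- pv_equiv track=rewrite | github.com/Aarogaming/Workbench | scripts/check_workflow_run_summary_wiring.py | check_workflow_content
-- ===== SOURCE A (Python) =====
-- REQUIRED_STEPS: tuple[str, ...] = (
--     "Generate run summary",
--     "Validate run summary",
--     "Upload run summary artifact",
-- )
--
-- REQUIRED_IF = "if: ${{ failure() || cancelled() }}"
--
-- STEP_REQUIRED_TOKENS: dict[str, tuple[str, ...]] = {
--     "Generate run summary": ("scripts/generate_run_summary.py", "--failure-taxonomy"),
--     "Validate run summary": ("scripts/validate_run_summary.py",),
--     "Upload run summary artifact": ("actions/upload-artifact@",),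
-- }
--
-- STEP_OPTIONAL_TOKENS: dict[str, tuple[str, ...]] = {
--     "Generate run summary": ("scripts/select_failure_taxonomy.py",),
-- }
--
-- def _step_line_indexes(lines: list[str], step_name: str) -> list[int]:
--     needle = f"- name: {step_name}"
--     return [idx for idx, line in enumerate(lines) if line.strip() == needle]
--
-- def _step_blocks(lines: list[str], step_name: str) -> list[list[str]]:
--     indexes = _step_line_indexes(lines, step_name)
--     name_indexes = [
--         idx for idx, line in enumerate(lines) if line.lstrip().startswith("- name:")
--     ]
--     blocks: list[list[str]] = []
--     for idx in indexes:
--         next_indexes = [value for value in name_indexes if value > idx]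
--         end = next_indexes[0] if next_indexes else len(lines)
--         blocks.append(lines[idx:end])
--     return blocks
--
-- def check_workflow_content(content: str, workflow_label: str) -> list[str]:
--     issues: list[str] = []
--     lines = content.splitlines()
--
--     for step_name in REQUIRED_STEPS:
--         blocks = _step_blocks(lines, step_name)
--         if not blocks:
--             issues.append(f"{workflow_label}: missing step '{step_name}'")
--             continue
--         if not any(any(REQUIRED_IF in line for line in block) for block in blocks):
--             issues.append(
--                 f"{workflow_label}: step '{step_name}' missing failure/cancelled condition"
--             )
--         required_tokens = STEP_REQUIRED_TOKENS.get(step_name, ())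
--         for token in required_tokens:
--             if not any(any(token in line for line in block) for block in blocks):
--                 issues.append(
--                     f"{workflow_label}: step '{step_name}' missing expected token '{token}'"
--                 )
--         optional_tokens = STEP_OPTIONAL_TOKENS.get(step_name, ())
--         for token in optional_tokens:
--             if not any(any(token in line for line in block) for block in blocks):
--                 issues.append(
--                     f"{workflow_label}: step '{step_name}' missing expected token '{token}'"
--                 )
--
--     if "run_summary/run_summary.json" not in content:
--         issues.append(f"{workflow_label}: missing run_summary JSON artifact path")
--     if "run_summary/run_summary.md" not in content:
--         issues.append(f"{workflow_label}: missing run_summary markdown artifact path")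
--     if "name: run-summary-" not in content:
--         issues.append(f"{workflow_label}: missing run-summary artifact naming")
--
--     return issues
-- ===== SOURCE B (Python) =====
-- REQUIRED_STEPS: tuple[str, ...] = (
--     "Generate run summary",
--     "Validate run summary",
--     "Upload run summary artifact",
-- )
--
-- REQUIRED_IF = "if: ${{ failure() || cancelled() }}"
--
-- STEP_REQUIRED_TOKENS: dict[str, tuple[str, ...]] = {
--     "Generate run summary": ("scripts/generate_run_summary.py", "--failure-taxonomy"),
--     "Validate run summary": ("scripts/validate_run_summary.py",),
--     "Upload run summary artifact": ("actions/upload-artifact@",),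
-- }
--
-- STEP_OPTIONAL_TOKENS: dict[str, tuple[str, ...]] = {
--     "Generate run summary": ("scripts/select_failure_taxonomy.py",),
-- }
--
--
-- def check_workflow_content(content: str, workflow_label: str) -> list[str]:
--     # One pass over the lines: every line is filed under the stripped text of the
--     # most recent '- name:' line, so blocks of duplicate step names end up merged
--     # under one key (only 'any line contains token' is asked afterwards).
--     scoped: dict[str, list[str]] = {}
--     current: str | None = None
--     for line in content.splitlines():
--         if line.lstrip().startswith("- name:"):
--             current = line.strip()
--             scoped.setdefault(current, [])
--         if current is not None:
--             scoped[current].append(line)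
--
--     issues: list[str] = []
--     for step_name in REQUIRED_STEPS:
--         block_lines = scoped.get(f"- name: {step_name}")
--         if block_lines is None:
--             issues.append(f"{workflow_label}: missing step '{step_name}'")
--             continue
--         if not any(REQUIRED_IF in line for line in block_lines):
--             issues.append(
--                 f"{workflow_label}: step '{step_name}' missing failure/cancelled condition"
--             )
--         tokens = STEP_REQUIRED_TOKENS.get(step_name, ()) + STEP_OPTIONAL_TOKENS.get(step_name, ())
--         for token in tokens:
--             if not any(token in line for line in block_lines):
--                 issues.append(
--                     f"{workflow_label}: step '{step_name}' missing expected token '{token}'"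
--                 )
--
--     if "run_summary/run_summary.json" not in content:
--         issues.append(f"{workflow_label}: missing run_summary JSON artifact path")
--     if "run_summary/run_summary.md" not in content:
--         issues.append(f"{workflow_label}: missing run_summary markdown artifact path")
--     if "name: run-summary-" not in content:
--         issues.append(f"{workflow_label}: missing run-summary artifact naming")
--
--     return issues
-- ===== Notes on version B (the rewrite author's own statement) =====
-- stated objective: simpler
-- what changed: A re-scans all lines per step to collect index-delimited slice blocks; B makes one pass that files each line under the stripped text of the most recent '- name:' line into a dict, then checks each step against its merged block lines.
import Mathlib
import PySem

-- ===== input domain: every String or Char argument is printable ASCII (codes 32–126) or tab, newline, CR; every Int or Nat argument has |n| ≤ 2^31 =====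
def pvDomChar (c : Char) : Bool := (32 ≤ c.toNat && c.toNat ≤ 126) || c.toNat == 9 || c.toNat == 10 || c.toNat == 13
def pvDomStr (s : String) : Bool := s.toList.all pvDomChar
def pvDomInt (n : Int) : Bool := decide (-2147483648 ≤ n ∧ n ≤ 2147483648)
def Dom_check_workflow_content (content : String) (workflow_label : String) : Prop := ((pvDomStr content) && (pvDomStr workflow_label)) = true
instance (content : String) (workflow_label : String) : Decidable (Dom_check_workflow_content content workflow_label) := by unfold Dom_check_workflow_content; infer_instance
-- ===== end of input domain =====

-- B replaces A's per-step index/slice block extraction by one pass that files each line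
-- under the stripped text of the most recent '- name:' line; objective: simpler.

-- ===== PORT A =====
def REQUIRED_STEPS : List String :=
  ["Generate run summary", "Validate run summary", "Upload run summary artifact"]

def REQUIRED_IF : String := "if: ${{ failure() || cancelled() }}"

def STEP_REQUIRED_TOKENS : PySem.Dict String (List String) :=
  PySem.Dict.ofList
    [("Generate run summary", ["scripts/generate_run_summary.py", "--failure-taxonomy"]),
     ("Validate run summary", ["scripts/validate_run_summary.py"]),
     ("Upload run summary artifact", ["actions/upload-artifact@"])]

def STEP_OPTIONAL_TOKENS : PySem.Dict String (List String) :=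
  PySem.Dict.ofList
    [("Generate run summary", ["scripts/select_failure_taxonomy.py"])]

def pv_step_line_indexes (lines : List String) (step_name : String) : List Int :=
  let needle := "- name: " ++ step_name
  (PySem.List.enumerate lines).filterMap
    (fun p => if PySem.Str.strip p.2 == needle then some p.1 else none)

def pv_step_blocks (lines : List String) (step_name : String) : List (List String) :=
  let indexes := pv_step_line_indexes lines step_name
  let name_indexes := (PySem.List.enumerate lines).filterMap
    (fun p => if PySem.Str.startswith (PySem.Str.lstrip p.2) "- name:" then some p.1 else none)
  indexes.foldl (fun blocks idx =>
    let next_indexes := name_indexes.filter (fun v => decide (idx < v))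
    let e : Int := match next_indexes with
      | [] => (lines.length : Int)
      | v :: _ => v
    blocks ++ [PySem.List.slice lines (some idx) (some e)]) []

def check_workflow_content (content : String) (workflow_label : String) : List String :=
  let issues : List String := []
  let lines := PySem.Str.splitlines content
  let issues := REQUIRED_STEPS.foldl (fun issues step_name =>
    let blocks := pv_step_blocks lines step_name
    if blocks.isEmpty then
      issues ++ [workflow_label ++ ": missing step '" ++ step_name ++ "'"]
    else
      let issues := if !(blocks.any (fun block => block.any (fun line => PySem.Str.isIn REQUIRED_IF line))) then
          issues ++ [workflow_label ++ ": step '" ++ step_name ++ "' missing failure/cancelled condition"]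
        else issues
      let required_tokens := STEP_REQUIRED_TOKENS.getD step_name []
      let issues := required_tokens.foldl (fun issues token =>
        if !(blocks.any (fun block => block.any (fun line => PySem.Str.isIn token line))) then
          issues ++ [workflow_label ++ ": step '" ++ step_name ++ "' missing expected token '" ++ token ++ "'"]
        else issues) issues
      let optional_tokens := STEP_OPTIONAL_TOKENS.getD step_name []
      let issues := optional_tokens.foldl (fun issues token =>
        if !(blocks.any (fun block => block.any (fun line => PySem.Str.isIn token line))) then
          issues ++ [workflow_label ++ ": step '" ++ step_name ++ "' missing expected token '" ++ token ++ "'"]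
        else issues) issues
      issues) issues
  let issues := if !(PySem.Str.isIn "run_summary/run_summary.json" content) then
      issues ++ [workflow_label ++ ": missing run_summary JSON artifact path"] else issues
  let issues := if !(PySem.Str.isIn "run_summary/run_summary.md" content) then
      issues ++ [workflow_label ++ ": missing run_summary markdown artifact path"] else issues
  let issues := if !(PySem.Str.isIn "name: run-summary-" content) then
      issues ++ [workflow_label ++ ": missing run-summary artifact naming"] else issues
  issues

-- ===== PORT B =====
-- one pass: file every line under the stripped text of the most recent '- name:' line
def pv_scoped (lines : List String) : PySem.Dict String (List String) × Option String :=
  lines.foldl (fun st line =>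
    let st :=
      if PySem.Str.startswith (PySem.Str.lstrip line) "- name:" then
        let c := PySem.Str.strip line
        (PySem.Dict.setdefault st.1 c [], some c)
      else st
    match st.2 with
    | some c => (PySem.Dict.modify st.1 c [] (fun ls => ls ++ [line]), st.2)
    | none => st) (PySem.Dict.empty, none)

def check_workflow_content_alt (content : String) (workflow_label : String) : List String :=
  let scopedD := (pv_scoped (PySem.Str.splitlines content)).1
  let issues := REQUIRED_STEPS.foldl (fun issues step_name =>
    match scopedD.get? ("- name: " ++ step_name) with
    | none => issues ++ [workflow_label ++ ": missing step '" ++ step_name ++ "'"]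
    | some block_lines =>
      let issues := if !(block_lines.any (fun line => PySem.Str.isIn REQUIRED_IF line)) then
          issues ++ [workflow_label ++ ": step '" ++ step_name ++ "' missing failure/cancelled condition"]
        else issues
      let tokens := STEP_REQUIRED_TOKENS.getD step_name [] ++ STEP_OPTIONAL_TOKENS.getD step_name []
      tokens.foldl (fun issues token =>
        if !(block_lines.any (fun line => PySem.Str.isIn token line)) then
          issues ++ [workflow_label ++ ": step '" ++ step_name ++ "' missing expected token '" ++ token ++ "'"]
        else issues) issues) []
  let issues := if !(PySem.Str.isIn "run_summary/run_summary.json" content) then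
      issues ++ [workflow_label ++ ": missing run_summary JSON artifact path"] else issues
  let issues := if !(PySem.Str.isIn "run_summary/run_summary.md" content) then
      issues ++ [workflow_label ++ ": missing run_summary markdown artifact path"] else issues
  let issues := if !(PySem.Str.isIn "name: run-summary-" content) then
      issues ++ [workflow_label ++ ": missing run-summary artifact naming"] else issues
  issues

-- ===== PRECONDITION & SPEC =====
def Spec_check_workflow_content (content : String) (workflow_label : String) (out : List String) : Prop := out = check_workflow_content_alt content workflow_label
instance (content : String) (workflow_label : String) (out : List String) : Decidable (Spec_check_workflow_content content workflow_label out) := by unfold Spec_check_workflow_content; infer_instance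

-- ===== CLAIM (what is proved, stated in full; the proofs are below) =====
def Claim_equal_check_workflow_content : Prop := ∀ (content : String) (workflow_label : String), Dom_check_workflow_content content workflow_label → Spec_check_workflow_content content workflow_label (check_workflow_content content workflow_label)

-- ===== LEMMAS AND PROOFS =====

-- a line that starts a step block ('- name:' after lstrip)
def pvNameB (l : String) : Bool := PySem.Str.startswith (PySem.Str.lstrip l) "- name:"

-- index list of the lines satisfying c (enumerate-and-filter, as in A's helpers)
def pvIdx (c : String → Bool) (lines : List String) : List Int :=
  (PySem.List.enumerate lines).filterMap (fun p => if c p.2 then some p.1 else none)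

-- the 'end of block' computation of A, over an index list
def pvEndOf (N : List Int) (len : Int) (idx : Int) : Int :=
  match N.filter (fun v => decide (idx < v)) with
  | [] => len
  | v :: _ => v

-- B's loop body, named so the induction can speak about it (same lambda as in pv_scoped)
def pvStep (st : PySem.Dict String (List String) × Option String) (line : String) :
    PySem.Dict String (List String) × Option String :=
  let st :=
    if PySem.Str.startswith (PySem.Str.lstrip line) "- name:" then
      let c := PySem.Str.strip line
      (PySem.Dict.setdefault st.1 c [], some c)
    else st
  match st.2 with
  | some c => (PySem.Dict.modify st.1 c [] (fun ls => ls ++ [line]), st.2)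
  | none => st

theorem pv_scoped_eq_foldl (lines : List String) :
    pv_scoped lines = lines.foldl pvStep (PySem.Dict.empty, none) := rfl

theorem pvIdx_shift (c : String → Bool) (xs : List String) (n : Int) :
    (PySem.List.enumerate xs (n+1)).filterMap (fun p => if c p.2 then some p.1 else none)
      = ((PySem.List.enumerate xs n).filterMap (fun p => if c p.2 then some p.1 else none)).map (· + 1) := by
  induction xs generalizing n with
  | nil => simp [PySem.List.enumerate_nil]
  | cons x xs ih =>
    simp only [PySem.List.enumerate_cons, List.filterMap_cons]
    by_cases h : c x
    · simp [h, ih (n+1)]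
    · simp [h, ih (n+1)]

theorem pvIdx_cons (c : String → Bool) (l : String) (rest : List String) :
    pvIdx c (l :: rest) = (if c l then [(0:Int)] else []) ++ (pvIdx c rest).map (· + 1) := by
  unfold pvIdx
  rw [PySem.List.enumerate_cons, List.filterMap_cons]
  have := pvIdx_shift c rest 0
  norm_num at this
  by_cases h : c l <;> simp [h, this]

theorem pvIdx_natCast (c : String → Bool) (xs : List String) :
    ∀ i ∈ pvIdx c xs, ∃ k : Nat, i = (k : Int) := by
  intro i hi
  unfold pvIdx at hi
  obtain ⟨p, hp, hpi⟩ := List.mem_filterMap.mp hi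
  rw [PySem.List.mem_enumerate_iff] at hp
  obtain ⟨k, hk, rfl⟩ := hp
  by_cases h : c xs[k] <;> simp [h] at hpi
  exact ⟨k, by omega⟩

theorem pvIdx_nil_iff (c : String → Bool) (xs : List String) :
    pvIdx c xs = [] ↔ ∀ x ∈ xs, c x = false := by
  induction xs with
  | nil => simp [pvIdx, PySem.List.enumerate_nil]
  | cons x xs ih =>
    rw [pvIdx_cons]
    by_cases h : c x <;> simp [h, ih]

-- the first c-index (or the length) cuts the list exactly at takeWhile (!c)
theorem pvFirstIdx_take (c : String → Bool) (xs : List String) :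
    ∃ n : Nat, (match pvIdx c xs with
        | [] => (xs.length : Int)
        | v :: _ => v) = (n : Int) ∧ n ≤ xs.length ∧ xs.take n = xs.takeWhile (fun x => !c x) := by
  induction xs with
  | nil => exact ⟨0, by simp [pvIdx, PySem.List.enumerate_nil]⟩
  | cons x xs ih =>
    rw [pvIdx_cons]
    by_cases h : c x
    · exact ⟨0, by simp [h]⟩
    · obtain ⟨n, hn, hle, htake⟩ := ih
      refine ⟨n + 1, ?_, by simpa using hle, ?_⟩
      · rcases hx : pvIdx c xs with _ | ⟨v, vs⟩
        · simp [hx, h] at hn ⊢; omega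
        · simp [hx, h] at hn ⊢; omega
      · simp [h, htake]

-- a stripped line equal to '- name: <s>' is a '- name:' line
theorem pvNeedB_nameB (s l : String) (h : (PySem.Str.strip l == "- name: " ++ s) = true) :
    pvNameB l = true := by
  rw [beq_iff_eq] at h
  unfold pvNameB
  rw [PySem.Str.startswith_eq, PySem.Chars.startswith_iff]
  have htl : (PySem.Str.strip l).toList
      = ((PySem.Str.lstrip l).toList.reverse.dropWhile PySem.Chars.isspace).reverse := by
    simp [PySem.Chars.strip, PySem.Chars.rstrip]
  have hpref : (PySem.Str.strip l).toList <+: (PySem.Str.lstrip l).toList := by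
    rw [htl]
    have hsuf : (PySem.Str.lstrip l).toList.reverse.dropWhile PySem.Chars.isspace
        <:+ (PySem.Str.lstrip l).toList.reverse := List.dropWhile_suffix _
    simpa using List.reverse_prefix.mpr hsuf
  refine List.IsPrefix.trans ?_ hpref
  rw [h]
  have h2 : ("- name: " ++ s).toList = "- name: ".toList ++ s.toList := by simp
  rw [h2]
  refine List.IsPrefix.trans ?_ (List.prefix_append _ _)
  decide

-- A's block extraction in map form
theorem pv_step_blocks_eq_map (lines : List String) (s : String) :
    pv_step_blocks lines s
      = (pvIdx (fun x => PySem.Str.strip x == "- name: " ++ s) lines).map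
          (fun idx => PySem.List.slice lines (some idx)
            (some (pvEndOf (pvIdx pvNameB lines) (lines.length : Int) idx))) := by
  unfold pv_step_blocks pv_step_line_indexes
  rw [PySem.List.foldl_append_singleton_eq_map]
  rfl

theorem pvEndOf_shift (N : List Int) (len : Int) (i : Int) (hi : 0 ≤ i)
    (hN : ∀ v ∈ N, ∃ k : Nat, v = (k : Int)) (b : Bool) :
    pvEndOf ((if b then [(0:Int)] else []) ++ N.map (· + 1)) (len + 1) (i + 1)
      = pvEndOf N len i + 1 := by
  unfold pvEndOf
  rw [List.filter_append, List.filter_map]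
  have h0 : ((if b then [(0:Int)] else []).filter (fun v => decide (i + 1 < v))) = [] := by
    by_cases hb : b <;> simp [hb] <;> omega
  have hfun : (fun v => decide (i + 1 < v)) ∘ (· + (1:Int)) = fun v => decide (i < v) := by
    funext v; simp only [Function.comp]; exact decide_eq_decide.mpr (by omega)
  rw [h0, hfun]
  rcases hfil : N.filter (fun v => decide (i < v)) with _ | ⟨v, vs⟩ <;> simp

theorem pv_step_blocks_nil (s : String) : pv_step_blocks [] s = [] := by
  rw [pv_step_blocks_eq_map]; simp [pvIdx, PySem.List.enumerate_nil]

set_option maxHeartbeats 1000000 in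
theorem pv_step_blocks_cons (s l : String) (rest : List String) :
    pv_step_blocks (l :: rest) s
      = (if PySem.Str.strip l == "- name: " ++ s then [l :: rest.takeWhile (fun x => !pvNameB x)] else [])
        ++ pv_step_blocks rest s := by
  have hNcast := pvIdx_natCast pvNameB rest
  rw [pv_step_blocks_eq_map, pv_step_blocks_eq_map]
  rw [pvIdx_cons, pvIdx_cons]
  rw [List.map_append, List.map_map]
  have hlen : ((l :: rest).length : Int) = (rest.length : Int) + 1 := by simp
  have htail : ∀ i ∈ pvIdx (fun x => PySem.Str.strip x == "- name: " ++ s) rest,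
      ((fun idx => PySem.List.slice (l :: rest) (some idx)
          (some (pvEndOf ((if pvNameB l then [(0:Int)] else []) ++ (pvIdx pvNameB rest).map (· + 1))
            ((l :: rest).length : Int) idx))) ∘ (· + 1)) i
        = PySem.List.slice rest (some i) (some (pvEndOf (pvIdx pvNameB rest) (rest.length : Int) i)) := by
    intro i hi
    obtain ⟨k, rfl⟩ := pvIdx_natCast _ rest i hi
    simp only [Function.comp]
    rw [hlen, pvEndOf_shift _ _ _ (by omega) hNcast]
    have he : ∃ m : Nat, pvEndOf (pvIdx pvNameB rest) (rest.length : Int) (k : Int) = (m : Int) := by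
      unfold pvEndOf
      rcases hfil : (pvIdx pvNameB rest).filter (fun v => decide ((k:Int) < v)) with _ | ⟨v, vs⟩
      · exact ⟨rest.length, rfl⟩
      · exact hNcast v (List.mem_of_mem_filter (by rw [hfil]; exact List.mem_cons_self ..))
    obtain ⟨m, hm⟩ := he
    rw [hm]
    have h1 : ((k:Int) + 1) = ((k+1 : Nat) : Int) := by push_cast; ring
    have h2 : ((m:Int) + 1) = ((m+1 : Nat) : Int) := by push_cast; ring
    rw [h1, h2, PySem.List.slice_natCast, PySem.List.slice_natCast]
    simp only [List.drop_succ_cons]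
    congr 1
    omega
  rw [List.map_congr_left htail]
  congr 1
  by_cases hl : (PySem.Str.strip l == "- name: " ++ s) = true
  · rw [if_pos hl, if_pos hl]
    simp only [List.map_cons, List.map_nil]
    congr 1
    obtain ⟨n, hn, hle, htake⟩ := pvFirstIdx_take pvNameB rest
    have hend : pvEndOf ((if pvNameB l then [(0:Int)] else []) ++ (pvIdx pvNameB rest).map (· + 1))
        ((l :: rest).length : Int) 0 = ((n + 1 : Nat) : Int) := by
      unfold pvEndOf
      rw [List.filter_append, List.filter_map]
      have h0 : ((if pvNameB l then [(0:Int)] else []).filter (fun v => decide ((0:Int) < v))) = [] := by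
        by_cases hb : pvNameB l <;> simp [hb]
      have hfun : (fun v => decide ((0:Int) < v)) ∘ (· + (1:Int)) = fun v => decide ((-1:Int) < v) := by
        funext v; simp only [Function.comp]; exact decide_eq_decide.mpr (by omega)
      rw [h0, hfun, List.nil_append]
      have hall : (pvIdx pvNameB rest).filter (fun v => decide ((-1:Int) < v)) = pvIdx pvNameB rest := by
        apply List.filter_eq_self.mpr
        intro v hv
        obtain ⟨k, rfl⟩ := hNcast v hv
        simp only [decide_eq_true_eq]
        omega
      rw [hall]
      rcases hNc : pvIdx pvNameB rest with _ | ⟨v, vs⟩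
      · rw [hNc] at hn
        simp only [hNc] at hn ⊢
        simp only [List.map_nil]
        rw [hlen]
        simp at hn
        rw [← hn]
        push_cast
        ring
      · rw [hNc] at hn
        simp only at hn
        simp only [List.map_cons]
        rw [hn]
        push_cast
        ring
    rw [hend]
    rw [PySem.List.slice_zero_start, PySem.List.slice_to_natCast]
    rw [List.take_succ_cons, htake]
  · rw [if_neg hl, if_neg hl]
    simp only [List.map_nil]

-- the single-pass dictionary agrees with A's block extraction (loop invariant)
set_option maxHeartbeats 4000000 in
theorem pvInv (s : String) (p : String → Bool) (lines : List String) :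
    ∀ (d : PySem.Dict String (List String)) (cur : Option String),
      (∀ k, cur = some k → d.contains k = true) →
      ((lines.foldl pvStep (d, cur)).1.contains ("- name: " ++ s)
          = (d.contains ("- name: " ++ s) || lines.any (fun l => PySem.Str.strip l == "- name: " ++ s)))
      ∧ (((lines.foldl pvStep (d, cur)).1.getD ("- name: " ++ s) []).any p
          = ((d.getD ("- name: " ++ s) []).any p
             || ((cur == some ("- name: " ++ s)) && ((lines.takeWhile (fun x => !pvNameB x)).any p))
             || ((pv_step_blocks lines s).any (fun b => b.any p)))) := by
  induction lines with
  | nil =>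
    intro d cur hcur
    constructor
    · simp
    · simp [pv_step_blocks_nil]
  | cons l rest ih =>
    intro d cur hcur
    rw [List.foldl_cons]
    by_cases hname : pvNameB l = true
    · have hstep : pvStep (d, cur) l
          = (PySem.Dict.modify (PySem.Dict.setdefault d (PySem.Str.strip l) [])
              (PySem.Str.strip l) [] (fun ls => ls ++ [l]), some (PySem.Str.strip l)) := by
        unfold pvStep
        unfold pvNameB at hname
        rw [if_pos hname]
      rw [hstep]
      have hcur' : ∀ k, (some (PySem.Str.strip l) : Option String) = some k →
          (PySem.Dict.modify (PySem.Dict.setdefault d (PySem.Str.strip l) [])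
              (PySem.Str.strip l) [] (fun ls => ls ++ [l])).contains k = true := by
        intro k hk
        cases hk
        rw [PySem.Dict.contains_modify]
        simp
      obtain ⟨ihc, ihg⟩ := ih _ _ hcur'
      constructor
      · rw [ihc, PySem.Dict.contains_modify, PySem.Dict.contains_setdefault]
        rw [List.any_cons]
        by_cases hc : PySem.Str.strip l = "- name: " ++ s
        · simp [hc]
        · have h1 : ("- name: " ++ s == PySem.Str.strip l) = false := by
            simp [Ne.symm hc]
          have h2 : (PySem.Str.strip l == "- name: " ++ s) = false := by
            simp [hc]
          rw [h1, h2]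
          simp
      · rw [ihg, PySem.Dict.getD_modify]
        rw [pv_step_blocks_cons, List.any_append]
        have htw : (l :: rest).takeWhile (fun x => !pvNameB x) = [] := by
          simp [List.takeWhile_cons, hname]
        rw [htw]
        by_cases hc : PySem.Str.strip l = "- name: " ++ s
        · rw [if_pos hc.symm]
          have hsd : (PySem.Dict.setdefault d (PySem.Str.strip l) []).getD (PySem.Str.strip l) []
              = d.getD (PySem.Str.strip l) [] := PySem.Dict.getD_setdefault_self ..
          rw [hsd, hc]
          simp only [hc, beq_self_eq_true, if_pos, List.any_append, List.any_cons, List.any_nil]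
          rw [Bool.eq_iff_iff]
          simp [List.any_eq_true, or_assoc]
        · rw [if_neg (fun h => hc h.symm)]
          have hsd : (PySem.Dict.setdefault d (PySem.Str.strip l) []).getD ("- name: " ++ s) []
              = d.getD ("- name: " ++ s) [] := by
            rw [PySem.Dict.getD_eq_get?_getD, PySem.Dict.get?_setdefault_of_ne _ _ (fun h => hc h.symm),
              ← PySem.Dict.getD_eq_get?_getD]
          rw [hsd]
          have hbeq : (PySem.Str.strip l == "- name: " ++ s) = false := by
            simp [hc]
          rw [Bool.eq_iff_iff]
          simp [hc, List.any_eq_true, or_assoc]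
    · have hneed : (PySem.Str.strip l == "- name: " ++ s) = false := by
        by_contra h
        exact hname (pvNeedB_nameB s l (by simpa using h))
      have htw : (l :: rest).takeWhile (fun x => !pvNameB x)
          = l :: rest.takeWhile (fun x => !pvNameB x) := by
        simp [List.takeWhile_cons, hname]
      have hblocks := pv_step_blocks_cons s l rest
      rw [hneed] at hblocks
      simp only [Bool.false_eq_true, if_false, List.nil_append] at hblocks
      cases hc : cur with
      | none =>
        have hstep : pvStep (d, none) l = (d, none) := by
          unfold pvStep
          unfold pvNameB at hname
          rw [if_neg (by simpa using hname)]
        rw [hstep]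
        obtain ⟨ihc, ihg⟩ := ih d none (by intro k hk; cases hk)
        constructor
        · rw [ihc, List.any_cons, hneed]
          simp
        · rw [ihg, hblocks, htw]
          rw [Bool.eq_iff_iff]
          simp [List.any_eq_true, or_assoc]
      | some k =>
        have hstep : pvStep (d, some k) l = (PySem.Dict.modify d k [] (fun ls => ls ++ [l]), some k) := by
          unfold pvStep
          unfold pvNameB at hname
          rw [if_neg (by simpa using hname)]
        rw [hstep]
        have hcur' : ∀ k', (some k : Option String) = some k' →
            (PySem.Dict.modify d k [] (fun ls => ls ++ [l])).contains k' = true := by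
          intro k' hk'
          cases hk'
          rw [PySem.Dict.contains_modify]
          simp
        obtain ⟨ihc, ihg⟩ := ih _ _ hcur'
        constructor
        · rw [ihc, PySem.Dict.contains_modify, List.any_cons, hneed]
          by_cases hk : ("- name: " ++ s) = k
          · subst hk
            rw [hcur _ hc]
            simp
          · have hb : (("- name: " ++ s : String) == k) = false := beq_eq_false_iff_ne.mpr hk
            rw [hb]
            simp
        · rw [ihg, PySem.Dict.getD_modify, hblocks, htw]
          by_cases hk : ("- name: " ++ s) = k
          · subst hk
            rw [if_pos rfl]
            simp only [List.any_append, List.any_cons, List.any_nil, beq_self_eq_true,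
              Option.some.injEq]
            rw [Bool.eq_iff_iff]
            simp [List.any_eq_true, or_assoc]
          · rw [if_neg hk]
            have hbe : ((some k : Option String) == some ("- name: " ++ s)) = false := by
              rw [beq_eq_false_iff_ne]
              intro h
              exact hk (Option.some.inj h).symm
            rw [hbe]
            rw [Bool.eq_iff_iff]
            simp [List.any_eq_true, or_assoc]

-- consequences for the finished dictionary
theorem pv_scoped_get?_none (lines : List String) (s : String) :
    ((pv_scoped lines).1.get? ("- name: " ++ s) = none) ↔ pv_step_blocks lines s = [] := by
  rw [pv_scoped_eq_foldl, PySem.Dict.get?_eq_none_iff_contains,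
    (pvInv s (fun _ => false) lines PySem.Dict.empty none (by intro k hk; cases hk)).1]
  rw [PySem.Dict.contains_empty, Bool.false_or]
  rw [pv_step_blocks_eq_map]
  constructor
  · intro h
    have : pvIdx (fun x => PySem.Str.strip x == "- name: " ++ s) lines = [] := by
      rw [pvIdx_nil_iff]
      intro x hx
      have := List.any_eq_false.mp h x hx
      simpa using this
    rw [this]; rfl
  · intro h
    rw [List.map_eq_nil_iff] at h
    rw [List.any_eq_false]
    intro x hx
    simpa using (pvIdx_nil_iff _ _).mp h x hx

theorem pv_scoped_get?_some (lines : List String) (s : String) (bl : List String)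
    (h : (pv_scoped lines).1.get? ("- name: " ++ s) = some bl) (p : String → Bool) :
    bl.any p = (pv_step_blocks lines s).any (fun b => b.any p) := by
  have hg : (pv_scoped lines).1.getD ("- name: " ++ s) [] = bl := by
    rw [PySem.Dict.getD_eq_get?_getD, h]; rfl
  have := (pvInv s p lines PySem.Dict.empty none (by intro k hk; cases hk)).2
  rw [← pv_scoped_eq_foldl, hg] at this
  simpa using this

-- the two per-step bodies agree
theorem pv_perStep (lines : List String) (workflow_label : String) (issues : List String)
    (step_name : String) :
    (let blocks := pv_step_blocks lines step_name
     if blocks.isEmpty then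
       issues ++ [workflow_label ++ ": missing step '" ++ step_name ++ "'"]
     else
       let issues := if !(blocks.any (fun block => block.any (fun line => PySem.Str.isIn REQUIRED_IF line))) then
           issues ++ [workflow_label ++ ": step '" ++ step_name ++ "' missing failure/cancelled condition"]
         else issues
       let required_tokens := STEP_REQUIRED_TOKENS.getD step_name []
       let issues := required_tokens.foldl (fun issues token =>
         if !(blocks.any (fun block => block.any (fun line => PySem.Str.isIn token line))) then
           issues ++ [workflow_label ++ ": step '" ++ step_name ++ "' missing expected token '" ++ token ++ "'"]
         else issues) issues
       let optional_tokens := STEP_OPTIONAL_TOKENS.getD step_name []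
       let issues := optional_tokens.foldl (fun issues token =>
         if !(blocks.any (fun block => block.any (fun line => PySem.Str.isIn token line))) then
           issues ++ [workflow_label ++ ": step '" ++ step_name ++ "' missing expected token '" ++ token ++ "'"]
         else issues) issues
       issues)
    = (match (pv_scoped lines).1.get? ("- name: " ++ step_name) with
       | none => issues ++ [workflow_label ++ ": missing step '" ++ step_name ++ "'"]
       | some block_lines =>
         let issues := if !(block_lines.any (fun line => PySem.Str.isIn REQUIRED_IF line)) then
             issues ++ [workflow_label ++ ": step '" ++ step_name ++ "' missing failure/cancelled condition"]
           else issues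
         let tokens := STEP_REQUIRED_TOKENS.getD step_name [] ++ STEP_OPTIONAL_TOKENS.getD step_name []
         tokens.foldl (fun issues token =>
           if !(block_lines.any (fun line => PySem.Str.isIn token line)) then
             issues ++ [workflow_label ++ ": step '" ++ step_name ++ "' missing expected token '" ++ token ++ "'"]
           else issues) issues) := by
  rcases hbl : (pv_scoped lines).1.get? ("- name: " ++ step_name) with _ | bl
  · have hempty : pv_step_blocks lines step_name = [] := (pv_scoped_get?_none lines step_name).mp hbl
    simp only [hempty, List.isEmpty_nil, if_pos]
  · have hne : ¬ pv_step_blocks lines step_name = [] := by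
      intro h
      rw [← pv_scoped_get?_none lines step_name] at h
      rw [hbl] at h
      cases h
    have hisEmpty : (pv_step_blocks lines step_name).isEmpty = false := by
      rw [List.isEmpty_eq_false_iff]
      exact hne
    simp only [hisEmpty, Bool.false_eq_true, if_false]
    have hany : ∀ p : String → Bool,
        (pv_step_blocks lines step_name).any (fun b => b.any p) = bl.any p :=
      fun p => (pv_scoped_get?_some lines step_name bl hbl p).symm
    rw [hany (fun line => PySem.Str.isIn REQUIRED_IF line)]
    rw [List.foldl_append]
    congr 1
    · funext issues token
      rw [hany (fun line => PySem.Str.isIn token line)]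
    · congr 1
      funext issues token
      rw [hany (fun line => PySem.Str.isIn token line)]

-- ===== VERDICT (by name: the statement is the Claim_ definition above) =====
theorem check_workflow_content_spec : Claim_equal_check_workflow_content := by
  intro content workflow_label _
  show check_workflow_content content workflow_label
      = check_workflow_content_alt content workflow_label
  simp only [check_workflow_content, check_workflow_content_alt]
  have hfold : REQUIRED_STEPS.foldl (fun issues step_name =>
      let blocks := pv_step_blocks (PySem.Str.splitlines content) step_name
      if blocks.isEmpty then
        issues ++ [workflow_label ++ ": missing step '" ++ step_name ++ "'"]
      else
        let issues := if !(blocks.any (fun block => block.any (fun line => PySem.Str.isIn REQUIRED_IF line))) then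
            issues ++ [workflow_label ++ ": step '" ++ step_name ++ "' missing failure/cancelled condition"]
          else issues
        let required_tokens := STEP_REQUIRED_TOKENS.getD step_name []
        let issues := required_tokens.foldl (fun issues token =>
          if !(blocks.any (fun block => block.any (fun line => PySem.Str.isIn token line))) then
            issues ++ [workflow_label ++ ": step '" ++ step_name ++ "' missing expected token '" ++ token ++ "'"]
          else issues) issues
        let optional_tokens := STEP_OPTIONAL_TOKENS.getD step_name []
        let issues := optional_tokens.foldl (fun issues token =>
          if !(blocks.any (fun block => block.any (fun line => PySem.Str.isIn token line))) then
            issues ++ [workflow_label ++ ": step '" ++ step_name ++ "' missing expected token '" ++ token ++ "'"]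
          else issues) issues
        issues) []
      = REQUIRED_STEPS.foldl (fun issues step_name =>
        match (pv_scoped (PySem.Str.splitlines content)).1.get? ("- name: " ++ step_name) with
        | none => issues ++ [workflow_label ++ ": missing step '" ++ step_name ++ "'"]
        | some block_lines =>
          let issues := if !(block_lines.any (fun line => PySem.Str.isIn REQUIRED_IF line)) then
              issues ++ [workflow_label ++ ": step '" ++ step_name ++ "' missing failure/cancelled condition"]
            else issues
          let tokens := STEP_REQUIRED_TOKENS.getD step_name [] ++ STEP_OPTIONAL_TOKENS.getD step_name []
          tokens.foldl (fun issues token =>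
            if !(block_lines.any (fun line => PySem.Str.isIn token line)) then
              issues ++ [workflow_label ++ ": step '" ++ step_name ++ "' missing expected token '" ++ token ++ "'"]
            else issues) issues) [] := by
    congr 1
    funext issues step_name
    exact pv_perStep (PySem.Str.splitlines content) workflow_label issues step_name
  rw [hfold]
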